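-- pv_equiv track=rewrite | github.com/jinhuang12/ReGraph-RegionDAG | optimize-kernels/ptx_dag_tool_v2.py | logical_statements
-- ===== SOURCE A (Python) =====
-- from typing import List, Tuple, Dict, Optional
--
-- def logical_statements(ptx_text: str) -> List[Tuple[int, str]]:
--     stmts: List[Tuple[int,str]] = []
--     buf: List[str] = []
--     start_line: Optional[int] = None
--     for i, raw in enumerate(ptx_text.splitlines(), start=1):
--         line = raw.rstrip("\n")
--         if not buf:
--             start_line = i
--         buf.append(line)
--         if ";" in line:  # PTX statements end with ';' (simple heuristic)
--             stmt = " ".join(s.strip() for s in buf)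
--             stmts.append((start_line or i, stmt))
--             buf = []
--             start_line = None
--     # trailing buffer without ';' (labels/directives) are ignored by parse
--     return stmts
-- ===== SOURCE B (Python) =====
-- from typing import List, Tuple
--
-- def logical_statements(ptx_text: str) -> List[Tuple[int, str]]:
--     lines = ptx_text.splitlines()
--     terms = [i for i, ln in enumerate(lines) if ";" in ln]
--     out: List[Tuple[int, str]] = []
--     prev = -1
--     for t in terms:
--         out.append((prev + 2, " ".join(ln.strip() for ln in lines[prev + 1:t + 1])))
--         prev = t
--     return out
-- ===== Notes on version B (the rewrite author's own statement) =====
-- stated objective: alternative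
-- what changed: Replaced A's streaming state machine (buffer + optional start_line threaded through one loop) by a pre-scan that collects the indices of semicolon-terminated lines and then slices the line list between consecutive terminator indices; trailing unterminated lines are dropped because they are never sliced.
import Mathlib
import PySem

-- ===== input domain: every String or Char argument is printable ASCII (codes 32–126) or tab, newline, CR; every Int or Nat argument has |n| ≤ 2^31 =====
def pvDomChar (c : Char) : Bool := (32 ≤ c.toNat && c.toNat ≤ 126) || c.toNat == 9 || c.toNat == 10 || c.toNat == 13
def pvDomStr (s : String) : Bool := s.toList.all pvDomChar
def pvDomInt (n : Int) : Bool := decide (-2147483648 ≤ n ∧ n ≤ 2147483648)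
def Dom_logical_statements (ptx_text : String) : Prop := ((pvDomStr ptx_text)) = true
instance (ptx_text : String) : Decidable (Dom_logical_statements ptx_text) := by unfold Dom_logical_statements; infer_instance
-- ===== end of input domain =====

-- B replaces A's streaming buffer/start_line state machine by a pre-scan for terminator
-- indices followed by slicing between consecutive terminators (alternative decomposition,
-- same linear cost).

-- ===== PORT A =====
-- hand port of raw.rstrip("\n"): drop only trailing '\n' characters (exact; PySem has no
-- rstrip-with-chars primitive)
def pyRstripNl (s : String) : String :=
  String.ofList ((s.toList.reverse.dropWhile (fun c => c == '\n')).reverse)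

-- one iteration of A's loop; state = (stmts, buf, start_line).
-- `start_line or i` is ported as `.getD p.1`: start_line is only ever None or a line
-- number ≥ 1 (enumerate starts at 1), so the falsy-0 case of Python's `or` never occurs.
def lsStep (st : List (Int × String) × List String × Option Int) (p : Int × String) :
    List (Int × String) × List String × Option Int :=
  let line := pyRstripNl p.2
  let sl := if st.2.1.isEmpty then some p.1 else st.2.2
  let buf := st.2.1 ++ [line]
  if PySem.Str.isIn ";" line then
    (st.1 ++ [(sl.getD p.1, PySem.Str.join " " (buf.map PySem.Str.strip))], [], none)
  else (st.1, buf, sl)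

def logical_statements (ptx_text : String) : List (Int × String) :=
  ((PySem.List.enumerate (PySem.Str.splitlines ptx_text) 1).foldl lsStep ([], [], none)).1

-- ===== PORT B =====
-- terms = [i for i, ln in enumerate(lines) if ";" in ln]
def lsTerms (lines : List String) : List Int :=
  ((PySem.List.enumerate lines 0).filter (fun p => PySem.Str.isIn ";" p.2)).map (fun p => p.1)

-- (prev + 2, " ".join(ln.strip() for ln in lines[prev+1 : t+1]))
def lsSliceStmt (lines : List String) (prev t : Int) : Int × String :=
  (prev + 2,
   PySem.Str.join " " ((PySem.List.slice lines (some (prev + 1)) (some (t + 1))).map PySem.Str.strip))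

def logical_statements_alt (ptx_text : String) : List (Int × String) :=
  let lines := PySem.Str.splitlines ptx_text
  ((lsTerms lines).foldl (fun st t => (st.1 ++ [lsSliceStmt lines st.2 t], t)) ([], -1)).1

-- ===== PRECONDITION & SPEC =====
def Spec_logical_statements (ptx_text : String) (out : List (Int × String)) : Prop := out = logical_statements_alt ptx_text
instance (ptx_text : String) (out : List (Int × String)) : Decidable (Spec_logical_statements ptx_text out) := by unfold Spec_logical_statements; infer_instance

-- ===== CLAIM (what is proved, stated in full; the proofs are below) =====
def Claim_equal_logical_statements : Prop := ∀ (ptx_text : String), Dom_logical_statements ptx_text → Spec_logical_statements ptx_text (logical_statements ptx_text)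

-- ===== LEMMAS AND PROOFS =====

-- common characterisation: chunkSpec i pend ls emits one statement per ';'-line of ls,
-- where i is the 1-based line number of the head of ls and pend the lines buffered so far.
def chunkSpec : Int → List String → List String → List (Int × String)
  | _, _, [] => []
  | i, pend, l :: ls =>
      if PySem.Str.isIn ";" l then
        (i - pend.length, PySem.Str.join " " ((pend ++ [l]).map PySem.Str.strip))
          :: chunkSpec (i + 1) [] ls
      else chunkSpec (i + 1) (pend ++ [l]) ls

-- A's loop body once rstrip("\n") is known to be the identity on its line
def lsStepClean (st : List (Int × String) × List String × Option Int) (p : Int × String) :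
    List (Int × String) × List String × Option Int :=
  let sl := if st.2.1.isEmpty then some p.1 else st.2.2
  let buf := st.2.1 ++ [p.2]
  if PySem.Str.isIn ";" p.2 then
    (st.1 ++ [(sl.getD p.1, PySem.Str.join " " (buf.map PySem.Str.strip))], [], none)
  else (st.1, buf, sl)

theorem dropWhile_eq_self_of_not {α : Type} (p : α → Bool) (l : List α)
    (h : ∀ x ∈ l, p x = false) : l.dropWhile p = l := by
  cases l with
  | nil => rfl
  | cons a l => rw [List.dropWhile_cons, h a (by simp)]; simp

theorem rstripNl_eq_self (s : String) (h : '\n' ∉ s.toList) : pyRstripNl s = s := by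
  unfold pyRstripNl
  rw [dropWhile_eq_self_of_not _ _ (by
    intro x hx
    simp only [List.mem_reverse] at hx
    simp only [beq_eq_false_iff_ne, ne_eq]
    rintro rfl; exact h hx)]
  simp [String.ofList_toList]

theorem splitlines_go_mem (isB : Char → Bool) (s cur : List Char) (acc : List (List Char))
    (hcur : ∀ c ∈ cur, isB c = false) (hacc : ∀ l ∈ acc, ∀ c ∈ l, isB c = false) :
    ∀ l ∈ PySem.Chars.splitlines.go isB s cur acc, ∀ c ∈ l, isB c = false := by
  have haccx : ∀ (cur : List Char) (acc : List (List Char)),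
      (∀ c ∈ cur, isB c = false) → (∀ l ∈ acc, ∀ c ∈ l, isB c = false) →
      ∀ l ∈ cur.reverse :: acc, ∀ c ∈ l, isB c = false := by
    intro cur acc hcur hacc l hl
    rcases List.mem_cons.1 hl with rfl | hl
    · intro c hc; exact hcur c (List.mem_reverse.1 hc)
    · exact hacc l hl
  fun_induction PySem.Chars.splitlines.go isB s cur acc with
  | case1 cur acc h =>
    intro l hl; exact hacc l (List.mem_reverse.1 hl)
  | case2 cur acc h =>
    intro l hl; exact haccx cur acc hcur hacc l (List.mem_reverse.1 hl)
  | case3 rest cur acc ih =>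
    exact ih (by simp) (haccx cur acc hcur hacc)
  | case4 c rest cur acc hx h ih =>
    exact ih (by simp) (haccx cur acc hcur hacc)
  | case5 c rest cur acc hx h ih =>
    refine ih ?_ hacc
    intro x hxm
    rcases List.mem_cons.1 hxm with rfl | hxm
    · simpa using h
    · exact hcur x hxm

theorem splitlines_no_break (s : String) (l : String) (hl : l ∈ PySem.Str.splitlines s) :
    '\n' ∉ l.toList := by
  intro hc
  have h2 : l.toList ∈ PySem.Chars.splitlines s.toList := by
    rw [← PySem.Str.splitlines_map_toList]
    exact List.mem_map_of_mem hl
  unfold PySem.Chars.splitlines at h2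
  have := splitlines_go_mem _ _ _ _ (by simp) (by simp) _ h2 '\n' hc
  simp at this

-- A's fold computes chunkSpec
theorem lemA' (ls : List String) : ∀ (i : Int) (stmts : List (Int × String)) (buf : List String)
    (sl : Option Int), (buf ≠ [] → sl = some (i - buf.length)) →
    ((PySem.List.enumerate ls i).foldl lsStepClean (stmts, buf, sl)).1
      = stmts ++ chunkSpec i buf ls := by
  induction ls with
  | nil => intro i stmts buf sl _; simp [PySem.List.enumerate, chunkSpec]
  | cons l ls ih =>
    intro i stmts buf sl hsl
    rw [PySem.List.enumerate_cons, List.foldl_cons]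
    by_cases h : PySem.Str.isIn ";" l = true
    · have hstep : lsStepClean (stmts, buf, sl) (i, l)
          = (stmts ++ [(i - buf.length,
              PySem.Str.join " " ((buf ++ [l]).map PySem.Str.strip))], [], none) := by
        simp only [lsStepClean, h, if_true]
        cases buf with
        | nil => simp
        | cons b bs =>
          rw [hsl (by simp)]
          simp
      rw [hstep, ih (i+1) _ [] none (by simp)]
      simp only [chunkSpec, h, if_true]
      simp
    · have hstep : lsStepClean (stmts, buf, sl) (i, l)
          = (stmts, buf ++ [l], if buf.isEmpty then some i else sl) := by
        simp only [lsStepClean, h]; simp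
      rw [hstep, ih (i+1) _ (buf ++ [l]) _ (by
        intro _
        cases buf with
        | nil => simp
        | cons b bs =>
          rw [if_neg (by simp), hsl (by simp)]
          congr 1
          simp only [List.length_append, List.length_cons]
          push_cast
          simp)]
      simp only [chunkSpec]
      rw [if_neg h]

-- the segment [m, n) of lines extended by one more element
theorem seg_snoc (lines : List String) (n m : Nat) (l : String) (ls : List String)
    (hm : m ≤ n) (hd : lines.drop n = l :: ls) :
    (lines.drop m).take (n + 1 - m) = (lines.drop m).take (n - m) ++ [l] := by
  have h1 : n + 1 - m = (n - m) + 1 := by omega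
  have hn : lines[n]? = some l := by
    have := congrArg (fun t => t[0]?) hd
    simpa [List.getElem?_drop] using this
  have h2 : (lines.drop m)[n - m]? = some l := by
    rw [List.getElem?_drop, show m + (n - m) = n by omega, hn]
  rw [h1, List.take_add_one, h2]
  rfl

-- B's fold computes chunkSpec
theorem lemB (lines : List String) : ∀ (ls : List String) (n m : Nat)
    (pend : List String) (out : List (Int × String)),
    m ≤ n → lines.drop n = ls → pend = (lines.drop m).take (n - m) → pend.length = n - m →
    ((((PySem.List.enumerate ls (n : Int)).filter (fun p => PySem.Str.isIn ";" p.2)).map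
        (fun p => p.1)).foldl
      (fun st t => (st.1 ++ [lsSliceStmt lines st.2 t], t)) (out, (m : Int) - 1)).1
      = out ++ chunkSpec ((n : Int) + 1) pend ls := by
  intro ls
  induction ls with
  | nil => intro n m pend out _ _ _ _; simp [PySem.List.enumerate, chunkSpec]
  | cons l ls ih =>
    intro n m pend out hm hd hpend hlen
    have hdrop1 : lines.drop (n + 1) = ls := by
      rw [← List.drop_drop, hd]; simp
    have hseg := seg_snoc lines n m l ls hm hd
    rw [PySem.List.enumerate_cons, List.filter_cons]
    by_cases h : PySem.Str.isIn ";" l = true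
    · rw [if_pos (by simpa using h)]
      rw [List.map_cons, List.foldl_cons]
      have hcast : ((n : Int) + 1) = ((n + 1 : Nat) : Int) := by push_cast; ring
      have hstep : lsSliceStmt lines ((m : Int) - 1) (n : Int)
          = ((m : Int) + 1, PySem.Str.join " " ((pend ++ [l]).map PySem.Str.strip)) := by
        unfold lsSliceStmt
        have h1 : (m : Int) - 1 + 1 = ((m : Nat) : Int) := by ring
        rw [h1, hcast, PySem.List.slice_natCast, hseg, ← hpend,
          show (m : Int) - 1 + 2 = (m : Int) + 1 by ring]
      rw [hstep]
      have := ih (n + 1) (n + 1) [] (out ++ [((m : Int) + 1, PySem.Str.join " " ((pend ++ [l]).map PySem.Str.strip))]) (le_refl _) hdrop1 (by simp) (by simp)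
      rw [show ((n + 1 : Nat) : Int) - 1 = (n : Int) by push_cast; ring] at this
      rw [← hcast] at this
      dsimp only
      rw [this]
      simp only [chunkSpec, h, if_true]
      have hfst : (n : Int) + 1 - (pend.length : Int) = (m : Int) + 1 := by
        rw [hlen]; omega
      rw [hfst]
      simp
    · rw [if_neg (by simpa using h)]
      have := ih (n + 1) m (pend ++ [l]) out (by omega) hdrop1
        (by rw [hseg, hpend]) (by simp [hlen]; omega)
      rw [show ((n + 1 : Nat) : Int) = (n : Int) + 1 by push_cast; ring] at this
      rw [this]
      simp only [chunkSpec]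
      rw [if_neg h]

-- ===== VERDICT (by name: the statement is the Claim_ definition above) =====
theorem logical_statements_spec : Claim_equal_logical_statements := by
  intro s _
  unfold Spec_logical_statements logical_statements logical_statements_alt
  rw [PySem.List.foldl_congr_mem _ lsStep lsStepClean _ (by
    intro acc x hx
    rw [PySem.List.mem_enumerate_iff] at hx
    obtain ⟨k, hk, rfl⟩ := hx
    have hnl : '\n' ∉ ((PySem.Str.splitlines s)[k]).toList :=
      splitlines_no_break s _ (by exact List.getElem_mem hk)
    simp only [lsStep, lsStepClean, rstripNl_eq_self _ hnl])]
  rw [lemA' _ 1 [] [] none (by simp)]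
  have := lemB (PySem.Str.splitlines s) (PySem.Str.splitlines s) 0 0 [] [] (le_refl 0)
    (by simp) (by simp) (by simp)
  simp only [Nat.cast_zero, zero_add] at this
  unfold lsTerms
  exact this.symm
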